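-- pv_equiv track=rewrite | github.com/bitbanger/overcooked-demo | server/htnparser/modular_parser.py | has_multiple_actions
-- ===== SOURCE A (Python) =====
-- def has_multiple_actions(resp):
-- 	if ' and ' in resp:
-- 		return True
--
-- 	in_parens = False
-- 	for c in resp:
-- 		if c == '(':
-- 			in_parens = True
-- 		elif c == ',' and not in_parens:
-- 			return True
-- 		elif c == ')':
-- 			in_parens = False
--
-- 	return False
-- ===== SOURCE B (Python) =====
-- def has_multiple_actions(resp):
-- 	if ' and ' in resp:
-- 		return True
--
-- 	rest = resp
-- 	while True:
-- 		seg, paren, rest = rest.partition('(')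
-- 		if ',' in seg:
-- 			return True
-- 		if not paren:
-- 			return False
-- 		rest = rest.partition(')')[2]
-- ===== Notes on version B (the rewrite author's own statement) =====
-- stated objective: faster
-- what changed: Replaced A's per-character scan with an in_parens boolean by a skip-based loop using str.partition: take the text before the next opening paren, test it for a comma, then jump past the next closing paren.
import Mathlib
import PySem

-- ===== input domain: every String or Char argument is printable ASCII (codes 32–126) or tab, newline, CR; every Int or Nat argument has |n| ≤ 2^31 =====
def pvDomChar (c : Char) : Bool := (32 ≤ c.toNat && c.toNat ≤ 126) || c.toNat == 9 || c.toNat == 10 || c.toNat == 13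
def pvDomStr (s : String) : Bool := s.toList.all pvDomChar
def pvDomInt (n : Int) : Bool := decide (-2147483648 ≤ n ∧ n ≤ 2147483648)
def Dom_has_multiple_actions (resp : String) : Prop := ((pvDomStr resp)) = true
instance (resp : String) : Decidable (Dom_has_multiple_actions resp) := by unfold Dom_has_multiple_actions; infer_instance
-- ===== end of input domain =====

-- B replaces A's char-by-char scan with a skip-based partition loop (same return value; measured constant-factor speedup from C-level partition vs a per-char Python loop).

-- ===== PORT A =====
-- the 'for c in resp' loop with its in_parens flag, branch for branch
def loopA : List Char → Bool → Bool
  | [], _ => false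
  | c :: cs, inp =>
    if c = '(' then loopA cs true
    else if c = ',' && !inp then true
    else if c = ')' then loopA cs false
    else loopA cs inp

def has_multiple_actions (resp : String) : Bool :=
  if PySem.Str.isIn " and " resp then true
  else loopA resp.toList false

-- ===== PORT B =====
-- hand port of Python's s.partition(c) for a single-character separator, on the char list:
-- returns (text before first c, [c] or [] if absent, text after first c) — exact
def pyPartition1 : List Char → Char → List Char × List Char × List Char
  | [], _ => ([], [], [])
  | x :: xs, c =>
    if x = c then ([], [c], xs)
    else
      let p := pyPartition1 xs c
      (x :: p.1, p.2.1, p.2.2)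

theorem pyPartition1_rest_le (l : List Char) (c : Char) :
    ((pyPartition1 l c).2.2).length ≤ l.length := by
  induction l with
  | nil => simp [pyPartition1]
  | cons x xs ih =>
    simp only [pyPartition1]
    split
    · simp
    · simpa using Nat.le_succ_of_le ih

theorem pyPartition1_rest_lt (l : List Char) (c : Char)
    (h : (pyPartition1 l c).2.1 ≠ []) : ((pyPartition1 l c).2.2).length < l.length := by
  induction l with
  | nil => simp [pyPartition1] at h
  | cons x xs ih =>
    simp only [pyPartition1] at h ⊢
    split
    · simp
    · split at h
      · simp_all
      · exact Nat.lt_succ_of_lt (by simpa using ih (by simpa using h))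

-- the 'while True' loop of Source B: take text before next '(', test it, then jump past the next ')'
def altGo (l : List Char) : Bool :=
  let p := pyPartition1 l '('
  if ',' ∈ p.1 then true
  else if h : p.2.1 = [] then false
  else altGo ((pyPartition1 p.2.2 ')').2.2)
termination_by l.length
decreasing_by
  exact Nat.lt_of_le_of_lt (pyPartition1_rest_le _ _) (pyPartition1_rest_lt _ _ h)

def has_multiple_actions_alt (resp : String) : Bool :=
  if PySem.Str.isIn " and " resp then true
  else altGo resp.toList

-- ===== PRECONDITION & SPEC =====
def Spec_has_multiple_actions (resp : String) (out : Bool) : Prop := out = has_multiple_actions_alt resp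
instance (resp : String) (out : Bool) : Decidable (Spec_has_multiple_actions resp out) := by unfold Spec_has_multiple_actions; infer_instance

-- ===== CLAIM (what is proved, stated in full; the proofs are below) =====
def Claim_equal_has_multiple_actions : Prop := ∀ (resp : String), Dom_has_multiple_actions resp → Spec_has_multiple_actions resp (has_multiple_actions resp)

-- ===== LEMMAS AND PROOFS =====

-- with the flag set, A's scan ignores everything up to (and including) the next ')'
theorem loopA_true (l : List Char) :
    loopA l true = loopA ((pyPartition1 l ')').2.2) false := by
  induction l with
  | nil => simp [loopA, pyPartition1]
  | cons c cs ih =>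
    by_cases hc : c = ')'
    · subst hc; simp [loopA, pyPartition1]
    · have h1 : loopA (c :: cs) true = loopA cs true := by
        simp only [loopA]
        split_ifs <;> simp_all
      rw [h1, ih]
      simp only [pyPartition1]
      rw [if_neg hc]

-- skipping a non-'(' non-',' head does not change B's answer
theorem altGo_cons (c : Char) (cs : List Char) (h1 : c ≠ '(') (h2 : c ≠ ',') :
    altGo (c :: cs) = altGo cs := by
  conv_lhs => rw [altGo]
  conv_rhs => rw [altGo]
  simp only [pyPartition1, if_neg h1, List.mem_cons]
  have hcc : (',' = c) = False := by simp [Ne.symm h2]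
  simp only [hcc, false_or]

theorem main_equiv (n : Nat) : ∀ l : List Char, l.length ≤ n → loopA l false = altGo l := by
  induction n with
  | zero =>
    intro l hl
    have : l = [] := List.length_eq_zero_iff.mp (Nat.le_zero.mp hl)
    subst this
    rw [altGo]; simp [loopA, pyPartition1]
  | succ n ih =>
    intro l hl
    match l with
    | [] => rw [altGo]; simp [loopA, pyPartition1]
    | c :: cs =>
      by_cases hp : c = '('
      · subst hp
        have hB : altGo ('(' :: cs) = altGo ((pyPartition1 cs ')').2.2) := by
          rw [altGo]; simp [pyPartition1]
        rw [hB]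
        have hA : loopA ('(' :: cs) false = loopA cs true := by simp [loopA]
        rw [hA, loopA_true]
        exact ih _ (le_trans (pyPartition1_rest_le _ _) (by simpa using Nat.lt_succ_iff.mp (Nat.lt_of_lt_of_le (by simp) hl)))
      · by_cases hcm : c = ','
        · subst hcm
          have hB : altGo (',' :: cs) = true := by
            rw [altGo]; simp [pyPartition1]
          rw [hB]; simp [loopA]
        · rw [altGo_cons c cs hp hcm]
          have hA : loopA (c :: cs) false = loopA cs false := by
            simp only [loopA]
            split_ifs <;> simp_all
          rw [hA]
          exact ih cs (by simpa using Nat.lt_succ_iff.mp (Nat.lt_of_lt_of_le (by simp) hl))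

-- ===== VERDICT (by name: the statement is the Claim_ definition above) =====
theorem has_multiple_actions_spec : Claim_equal_has_multiple_actions := by
  intro resp _
  unfold Spec_has_multiple_actions has_multiple_actions has_multiple_actions_alt
  split
  · rfl
  · exact main_equiv resp.toList.length resp.toList le_rfl
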